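-- pv_equiv track=rewrite | github.com/gmrvl/python_ege_2223 | 23/5273p-2.py | f
-- ===== SOURCE A (Python) =====
-- def f(x, y, commands):
--     if x > y:
--         return 0
--     elif x == y:
--         if commands.count('1') <= 4 and commands.count('2') >= 2 and commands.count('3') == 5:
--             return 1
--         else:
--             return 0
--     else:
--         return f(x * 5, y, commands + '1') + f(x * 3, y, commands + '2') + f(x + 45, y, commands + '3')
-- ===== SOURCE B (Python) =====
-- def f(x, y, commands):
--     memo = {}
--
--     def go(x, c1, c2, c3):
--         if x > y:
--             return 0
--         if x == y:
--             return 1 if (c1 <= 4 and c2 >= 2 and c3 == 5) else 0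
--         key = (x, c1, c2, c3)
--         if key not in memo:
--             memo[key] = (go(x * 5, c1 + 1, c2, c3)
--                          + go(x * 3, c1, c2 + 1, c3)
--                          + go(x + 45, c1, c2, c3 + 1))
--         return memo[key]
--
--     return go(x, commands.count('1'), commands.count('2'), commands.count('3'))
-- ===== Notes on version B (the rewrite author's own statement) =====
-- stated objective: alternative
-- what changed: B replaces A's recursion over a growing command string (re-counted at each leaf) by a recursion whose state is the current value and the three running operation counts (x, c1, c2, c3), memoized in a dict so each distinct state is computed once; on very deep inputs both still hit Python's recursion limit, so no speed is claimed.
import Mathlib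
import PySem

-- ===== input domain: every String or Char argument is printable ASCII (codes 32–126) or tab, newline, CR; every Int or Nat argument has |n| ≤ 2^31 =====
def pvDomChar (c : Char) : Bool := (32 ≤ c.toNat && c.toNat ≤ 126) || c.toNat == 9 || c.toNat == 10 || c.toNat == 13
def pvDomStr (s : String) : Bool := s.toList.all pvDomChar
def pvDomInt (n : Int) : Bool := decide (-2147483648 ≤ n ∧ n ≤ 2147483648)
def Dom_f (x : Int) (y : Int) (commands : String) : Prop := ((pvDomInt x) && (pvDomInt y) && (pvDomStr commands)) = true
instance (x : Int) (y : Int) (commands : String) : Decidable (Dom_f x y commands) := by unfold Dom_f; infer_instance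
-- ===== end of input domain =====

-- B recurses on the state (x, count1, count2, count3) with a memo dict instead of re-exploring a
-- growing command string; same return value wherever A returns.

-- ===== PORT A =====
-- A's recursion is not structural; the fuel (y - x).toNat + 1 is an upper bound on the
-- recursion depth wherever A terminates (Pre_f), and is a totality guard only.
def fGo (fuel : Nat) (x : Int) (y : Int) (commands : String) : Int :=
  match fuel with
  | 0 => 0
  | fuel + 1 =>
    if x > y then 0
    else if x = y then
      if PySem.Str.count commands "1" ≤ 4 ∧ 2 ≤ PySem.Str.count commands "2"
          ∧ PySem.Str.count commands "3" = 5 then 1 else 0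
    else
      fGo fuel (x * 5) y (commands ++ "1") + fGo fuel (x * 3) y (commands ++ "2")
        + fGo fuel (x + 45) y (commands ++ "3")

def f (x : Int) (y : Int) (commands : String) : Int :=
  fGo ((y - x).toNat + 1) x y commands

-- ===== PORT B =====
-- B's inner `go`, with the memo dict threaded through; same fuel guard as A's port.
def fAltGo (fuel : Nat) (y : Int) (x c1 c2 c3 : Int)
    (memo : PySem.Dict (Int × Int × Int × Int) Int) :
    Int × PySem.Dict (Int × Int × Int × Int) Int :=
  match fuel with
  | 0 => (0, memo)
  | fuel + 1 =>
    if x > y then (0, memo)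
    else if x = y then
      ((if c1 ≤ 4 ∧ 2 ≤ c2 ∧ c3 = 5 then 1 else 0), memo)
    else
      match memo.get? (x, c1, c2, c3) with
      | some v => (v, memo)
      | none =>
        let r1 := fAltGo fuel y (x * 5) (c1 + 1) c2 c3 memo
        let r2 := fAltGo fuel y (x * 3) c1 (c2 + 1) c3 r1.2
        let r3 := fAltGo fuel y (x + 45) c1 c2 (c3 + 1) r2.2
        let v := r1.1 + r2.1 + r3.1
        (v, r3.2.insert (x, c1, c2, c3) v)

def f_alt (x : Int) (y : Int) (commands : String) : Int :=
  (fAltGo ((y - x).toNat + 1) y x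
    (PySem.Str.count commands "1" : Int)
    (PySem.Str.count commands "2" : Int)
    (PySem.Str.count commands "3" : Int) PySem.Dict.empty).1

-- ===== PRECONDITION & SPEC =====
-- On x < y with x ≤ 0 the Python A recurses forever on x*5 ≤ x (RecursionError): excluded.
def Pre_f (x : Int) (y : Int) (commands : String) : Prop := 1 ≤ x ∨ y ≤ x
instance (x : Int) (y : Int) (commands : String) : Decidable (Pre_f x y commands) := by
  unfold Pre_f; infer_instance

def pvWitness_f : Int × Int × String := (1, 45, "3")

def Spec_f (x : Int) (y : Int) (commands : String) (out : Int) : Prop := out = f_alt x y commands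
instance (x : Int) (y : Int) (commands : String) (out : Int) : Decidable (Spec_f x y commands out) := by
  unfold Spec_f; infer_instance

-- ===== CLAIM (what is proved, stated in full; the proofs are below) =====
def Claim_equal_f : Prop := ∀ (x : Int) (y : Int) (commands : String),
  Dom_f x y commands → Pre_f x y commands → Spec_f x y commands (f x y commands)

-- ===== LEMMAS AND PROOFS =====

-- Pure (memo-free) reference recursion on the counts; both ports are reduced to it.
def pGo (fuel : Nat) (y : Int) (x c1 c2 c3 : Int) : Int :=
  match fuel with
  | 0 => 0
  | fuel + 1 =>
    if x > y then 0
    else if x = y then (if c1 ≤ 4 ∧ 2 ≤ c2 ∧ c3 = 5 then 1 else 0)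
    else
      pGo fuel y (x * 5) (c1 + 1) c2 c3 + pGo fuel y (x * 3) c1 (c2 + 1) c3
        + pGo fuel y (x + 45) c1 c2 (c3 + 1)

-- Str.count with a single-character pattern is List.count on the code points.
theorem charsCount_go_single (c : Char) :
    ∀ (fuel : Nat) (cs : List Char) (acc : Nat), cs.length ≤ fuel →
      PySem.Chars.count.go [c] fuel cs acc = acc + cs.count c := by
  intro fuel
  induction fuel with
  | zero =>
    intro cs acc h
    match cs with
    | [] => simp [PySem.Chars.count.go]
  | succ n ih =>
    intro cs acc h
    match cs with
    | [] => simp [PySem.Chars.count.go]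
    | h' :: t =>
      simp only [PySem.Chars.count.go]
      by_cases hc : c = h'
      · subst hc
        simp only [List.isPrefixOf, BEq.rfl, Bool.and_self, if_true, List.length_cons,
          List.length_nil, List.drop_succ_cons, List.drop_zero]
        rw [ih t (acc + 1) (by simpa using h)]
        simp
        omega
      · have : [c].isPrefixOf (h' :: t) = false := by
          simp [List.isPrefixOf, beq_eq_false_iff_ne, hc]
        rw [this]
        simp only [Bool.false_eq_true, if_false]
        rw [ih t acc (by simpa using h)]
        simp [eq_comm, hc]

theorem strCount_single (s : String) (c : Char) :
    PySem.Str.count s (String.ofList [c]) = s.toList.count c := by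
  have : PySem.Chars.count s.toList [c] = s.toList.count c := by
    unfold PySem.Chars.count
    simp only [List.isEmpty_cons, Bool.false_eq_true, if_false]
    simpa using charsCount_go_single c s.toList.length s.toList 0 le_rfl
  simpa using this

-- Step 1: A's recursion equals the pure count recursion with the same fuel.
theorem fGo_eq_pGo : ∀ (fuel : Nat) (x y : Int) (s : String),
    fGo fuel x y s
      = pGo fuel y x (s.toList.count '1' : Int) (s.toList.count '2' : Int)
          (s.toList.count '3' : Int) := by
  intro fuel
  induction fuel with
  | zero => intro x y s; rfl
  | succ n ih =>
    intro x y s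
    simp only [fGo, pGo]
    by_cases h1 : x > y
    · simp [h1]
    · simp only [h1, if_false]
      by_cases h2 : x = y
      · simp only [h2, if_true]
        have e1 := strCount_single s '1'
        have e2 := strCount_single s '2'
        have e3 := strCount_single s '3'
        have s1 : ("1" : String) = String.ofList ['1'] := rfl
        have s2 : ("2" : String) = String.ofList ['2'] := rfl
        have s3 : ("3" : String) = String.ofList ['3'] := rfl
        rw [s1, s2, s3, e1, e2, e3]
        by_cases hc : s.toList.count '1' ≤ 4 ∧ 2 ≤ s.toList.count '2' ∧ s.toList.count '3' = 5
        · rw [if_pos hc, if_pos (by omega)]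
        · rw [if_neg hc, if_neg (by omega)]
      · simp only [h2, if_false]
        rw [ih, ih, ih]
        have app : ∀ (c : Char), (s ++ String.ofList [c]).toList = s.toList ++ [c] := by
          intro c; simp
        have c1 : ("1" : String) = String.ofList ['1'] := rfl
        have c2 : ("2" : String) = String.ofList ['2'] := rfl
        have c3 : ("3" : String) = String.ofList ['3'] := rfl
        rw [c1, c2, c3]
        simp [app, List.count_append]

-- Step 2: the pure recursion is fuel-independent above the gap bound, on Pre_.
theorem pGo_stable (y : Int) : ∀ (f1 : Nat) (f2 : Nat) (x c1 c2 c3 : Int),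
    (1 ≤ x ∨ y ≤ x) → (y - x).toNat < f1 → (y - x).toNat < f2 →
    pGo f1 y x c1 c2 c3 = pGo f2 y x c1 c2 c3 := by
  intro f1
  induction f1 with
  | zero => intro f2 x c1 c2 c3 _ h1 _; omega
  | succ n ih =>
    intro f2 x c1 c2 c3 hpre h1 h2
    match f2 with
    | 0 => omega
    | m + 1 =>
      simp only [pGo]
      by_cases hgt : x > y
      · simp [hgt]
      · simp only [hgt, if_false]
        by_cases heq : x = y
        · simp [heq]
        · simp only [heq, if_false]
          have hx : 1 ≤ x := by
            rcases hpre with h | h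
            · exact h
            · omega
          have hlt : x < y := by omega
          rw [ih m (x * 5) (c1 + 1) c2 c3 (Or.inl (by omega)) (by omega) (by omega),
              ih m (x * 3) c1 (c2 + 1) c3 (Or.inl (by omega)) (by omega) (by omega),
              ih m (x + 45) c1 c2 (c3 + 1) (Or.inl (by omega)) (by omega) (by omega)]

-- Memo invariant: every stored value is the (fuel-independent) pure value of its key.
def MemoInv (y : Int) (d : PySem.Dict (Int × Int × Int × Int) Int) : Prop :=
  ∀ x c1 c2 c3 v, d.get? (x, c1, c2, c3) = some v →
    1 ≤ x ∧ x < y ∧ v = pGo ((y - x).toNat + 1) y x c1 c2 c3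

-- Step 3: B's memoized recursion computes the pure recursion and preserves the invariant.
theorem fAltGo_correct (y : Int) : ∀ (fuel : Nat) (x c1 c2 c3 : Int)
    (d : PySem.Dict (Int × Int × Int × Int) Int),
    (1 ≤ x ∨ y ≤ x) → (y - x).toNat < fuel → MemoInv y d →
    (fAltGo fuel y x c1 c2 c3 d).1 = pGo fuel y x c1 c2 c3
      ∧ MemoInv y (fAltGo fuel y x c1 c2 c3 d).2 := by
  intro fuel
  induction fuel with
  | zero => intro x c1 c2 c3 d _ h1 _; omega
  | succ n ih =>
    intro x c1 c2 c3 d hpre hfuel hinv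
    simp only [fAltGo, pGo]
    by_cases hgt : x > y
    · simp only [hgt, if_true]; exact ⟨trivial, hinv⟩
    · simp only [hgt, if_false]
      by_cases heq : x = y
      · simp only [heq, if_true]; exact ⟨trivial, hinv⟩
      · simp only [heq, if_false]
        have hx : 1 ≤ x := by
          rcases hpre with h | h
          · exact h
          · omega
        have hlt : x < y := by omega
        cases hget : d.get? (x, c1, c2, c3) with
        | some v =>
          simp only
          obtain ⟨_, _, hv⟩ := hinv x c1 c2 c3 v hget
          constructor
          · rw [hv]
            rw [pGo_stable y ((y - x).toNat + 1) (n + 1) x c1 c2 c3 (Or.inl hx)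
                (by omega) hfuel]
            simp only [pGo, hgt, heq, if_false]
          · exact hinv
        | none =>
          simp only
          obtain ⟨e1, i1⟩ := ih (x * 5) (c1 + 1) c2 c3 d (Or.inl (by omega)) (by omega) hinv
          obtain ⟨e2, i2⟩ := ih (x * 3) c1 (c2 + 1) c3 _ (Or.inl (by omega)) (by omega) i1
          obtain ⟨e3, i3⟩ := ih (x + 45) c1 c2 (c3 + 1) _ (Or.inl (by omega)) (by omega) i2
          refine ⟨by rw [e1, e2, e3], ?_⟩
          intro x' c1' c2' c3' v' hget'
          rw [PySem.Dict.get?_insert] at hget'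
          by_cases hk : (x', c1', c2', c3') = (x, c1, c2, c3)
          · rw [if_pos hk] at hget'
            obtain ⟨hx', hc1', hc2', hc3'⟩ : x' = x ∧ c1' = c1 ∧ c2' = c2 ∧ c3' = c3 := by
              simpa [Prod.ext_iff] using hk
            rw [hx', hc1', hc2', hc3']
            refine ⟨hx, hlt, ?_⟩
            have hv' : v' = (fAltGo n y (x * 5) (c1 + 1) c2 c3 d).1
                + (fAltGo n y (x * 3) c1 (c2 + 1) c3 (fAltGo n y (x * 5) (c1 + 1) c2 c3 d).2).1
                + (fAltGo n y (x + 45) c1 c2 (c3 + 1)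
                    (fAltGo n y (x * 3) c1 (c2 + 1) c3 (fAltGo n y (x * 5) (c1 + 1) c2 c3 d).2).2).1 := by
              injection hget' with h; exact h.symm
            rw [hv', e1, e2, e3]
            rw [pGo_stable y ((y - x).toNat + 1) (n + 1) x c1 c2 c3 (Or.inl hx) (by omega) hfuel]
            simp only [pGo, hgt, heq, if_false]
          · rw [if_neg hk] at hget'
            exact i3 x' c1' c2' c3' v' hget'

-- ===== VERDICT (by name: the statement is the Claim_ definition above) =====
theorem f_spec : Claim_equal_f := by
  intro x y s _ hpre
  unfold Spec_f f f_alt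
  have hfuel : (y - x).toNat < (y - x).toNat + 1 := by omega
  have hempty : MemoInv y PySem.Dict.empty := by
    intro x' c1' c2' c3' v h
    rw [PySem.Dict.get?_empty] at h
    exact absurd h (by simp)
  obtain ⟨he, _⟩ := fAltGo_correct y ((y - x).toNat + 1) x
    (PySem.Str.count s "1" : Int) (PySem.Str.count s "2" : Int)
    (PySem.Str.count s "3" : Int) PySem.Dict.empty hpre hfuel hempty
  rw [he, fGo_eq_pGo]
  have s1 : ("1" : String) = String.ofList ['1'] := rfl
  have s2 : ("2" : String) = String.ofList ['2'] := rfl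
  have s3 : ("3" : String) = String.ofList ['3'] := rfl
  rw [s1, s2, s3, strCount_single, strCount_single, strCount_single]
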